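-- pv_equiv track=rewrite | github.com/Mapanare-Research/Mapanare | tests/stdlib/test_kv_redis.py | _strip_redis_stubs
-- ===== SOURCE A (Python) =====
-- def _strip_redis_stubs(source: str) -> str:
--     """Remove redis stub functions from kv.mn (replaced by real redis.mn)."""
--     lines = source.splitlines()
--     result: list[str] = []
--     skip_depth = 0
--     skipping = False
--     for line in lines:
--         if not skipping and line.startswith("fn redis_"):
--             skipping = True
--             skip_depth = 0
--         if skipping:
--             skip_depth += line.count("{") - line.count("}")
--             if skip_depth <= 0 and ("}" in line or "{" in line):
--                 skipping = False
--             continue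
--         result.append(line)
--     return "\n".join(result)
-- ===== SOURCE B (Python) =====
-- def _strip_redis_stubs(source: str) -> str:
--     """Remove redis stub functions from kv.mn (replaced by real redis.mn)."""
--     lines = source.splitlines()
--     n = len(lines)
--     # pass 1: prefix sums of brace deltas, and a brace-presence table
--     pref = [0]
--     for line in lines:
--         pref.append(pref[-1] + line.count("{") - line.count("}"))
--     brace = [("{" in line or "}" in line) for line in lines]
--     # pass 2: collect the index intervals occupied by stub blocks
--     intervals = []
--     i = 0
--     while i < n:
--         if lines[i].startswith("fn redis_"):
--             j = next((j for j in range(i, n) if pref[j + 1] - pref[i] <= 0 and brace[j]), n)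
--             intervals.append((i, j))
--             i = j + 1
--         else:
--             i += 1
--     # pass 3: keep every line not covered by an interval
--     kept = [line for k, line in enumerate(lines)
--             if not any(s <= k <= e for s, e in intervals)]
--     return "\n".join(kept)
-- ===== Notes on version B (the rewrite author's own statement) =====
-- stated objective: alternative
-- what changed: Replaced A's stateful flag-driven single pass with a staged-pass algorithm: precompute brace-delta prefix sums and a brace-presence table, then collect the stub blocks as a list of index intervals (each block end found via the prefix sums), and finally filter the lines by interval membership.
import Mathlib
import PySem

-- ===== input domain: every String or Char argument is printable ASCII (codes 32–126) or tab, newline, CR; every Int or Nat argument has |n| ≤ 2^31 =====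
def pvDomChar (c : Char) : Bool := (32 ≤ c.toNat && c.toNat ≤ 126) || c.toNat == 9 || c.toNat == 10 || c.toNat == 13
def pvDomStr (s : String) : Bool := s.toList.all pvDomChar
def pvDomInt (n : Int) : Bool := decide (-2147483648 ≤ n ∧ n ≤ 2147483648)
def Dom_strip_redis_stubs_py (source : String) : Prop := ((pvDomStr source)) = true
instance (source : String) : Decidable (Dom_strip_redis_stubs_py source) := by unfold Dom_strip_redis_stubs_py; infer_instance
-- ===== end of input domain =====

-- Port A: A's flag-driven single pass. Port B: staged passes — brace-delta prefix sums and a brace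
-- table, then a list of stub index intervals, then a filter by interval membership. Objective: alternative algorithm, same cost.


-- ===== PORT A =====
-- A's for-loop over lines with state (result, skip_depth, skipping), transcribed as structural recursion.
def aLoop : List String → List String → Int → Bool → List String
  | [], result, _, _ => result
  | line :: rest, result, skip_depth, skipping =>
    let skipping1 := if !skipping && PySem.Str.startswith line "fn redis_" then true else skipping
    let skip_depth1 := if !skipping && PySem.Str.startswith line "fn redis_" then 0 else skip_depth
    if skipping1 then
      let d := skip_depth1 + (PySem.Str.count line "{" : Int) - (PySem.Str.count line "}" : Int)
      let skipping2 := if d ≤ 0 ∧ (PySem.Str.isIn "}" line = true ∨ PySem.Str.isIn "{" line = true) then false else true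
      aLoop rest result d skipping2
    else
      aLoop rest (result ++ [line]) skip_depth1 skipping1

def strip_redis_stubs_py (source : String) : String :=
  PySem.Str.join "\n" (aLoop (PySem.Str.splitlines source) [] 0 false)

-- ===== PORT B =====
-- per-line brace delta  line.count("{") - line.count("}")
def pvDelta (l : String) : Int := (PySem.Str.count l "{" : Int) - (PySem.Str.count l "}" : Int)
-- pass 1a: the prefix-sum list `pref` (Python's append loop, carrying pref[-1] as the argument)
def pvPrefs (p : Int) : List String → List Int
  | [] => [p]
  | l :: rest => p :: pvPrefs (p + pvDelta l) rest
-- pass 1b: the brace-presence table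
def pvBrace (l : String) : Bool := PySem.Str.isIn "{" l || PySem.Str.isIn "}" l
-- next((j for j in range(i, n) if pref[j+1] - pref[i] <= 0 and brace[j]), n)
def pvFindEnd (pref : List Int) (brace : List Bool) (n i : Nat) : Nat :=
  (((List.range' i (n - i)).find?
      (fun j => decide (pref.getD (j + 1) 0 - pref.getD i 0 ≤ 0) && brace.getD j false)).getD n)

theorem pvFindEnd_ge (pref : List Int) (brace : List Bool) (n i : Nat) (h : i < n) :
    i ≤ pvFindEnd pref brace n i := by
  unfold pvFindEnd
  cases hf : (List.range' i (n - i)).find?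
      (fun j => decide (pref.getD (j + 1) 0 - pref.getD i 0 ≤ 0) && brace.getD j false) with
  | none => simp; omega
  | some j =>
    have hm := List.mem_of_find?_eq_some hf
    have := (List.mem_range'_1.mp hm).1
    simp; omega

-- pass 2: the while loop collecting stub intervals (index recursion)
def pvIntervals (lines : List String) (pref : List Int) (brace : List Bool) (n : Nat) (i : Nat) :
    List (Nat × Nat) :=
  if h : i < n then
    if PySem.Str.startswith (lines.getD i "") "fn redis_" then
      (i, pvFindEnd pref brace n i) :: pvIntervals lines pref brace n (pvFindEnd pref brace n i + 1)
    else
      pvIntervals lines pref brace n (i + 1)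
  else []
  termination_by n - i
  decreasing_by
    · have := pvFindEnd_ge pref brace n i h; omega
    · omega

def strip_redis_stubs_py_alt (source : String) : String :=
  let lines := PySem.Str.splitlines source
  let n := lines.length
  let pref := pvPrefs 0 lines
  let brace := lines.map pvBrace
  let ivs := pvIntervals lines pref brace n 0
  PySem.Str.join "\n"
    (((PySem.List.enumerate lines).filter
        (fun kl => ! ivs.any (fun se => decide ((se.1 : Int) ≤ kl.1 ∧ kl.1 ≤ (se.2 : Int))))).map
      Prod.snd)

-- ===== PRECONDITION & SPEC =====
def Spec_strip_redis_stubs_py (source : String) (out : String) : Prop := out = strip_redis_stubs_py_alt source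
instance (source : String) (out : String) : Decidable (Spec_strip_redis_stubs_py source out) := by unfold Spec_strip_redis_stubs_py; infer_instance

-- ===== CLAIM (what is proved, stated in full; the proofs are below) =====
def Claim_equal_strip_redis_stubs_py : Prop := ∀ (source : String), Dom_strip_redis_stubs_py source → Spec_strip_redis_stubs_py source (strip_redis_stubs_py source)

-- ===== LEMMAS AND PROOFS =====

-- Mid-level form of the computation: skip a whole stub block (bInner), keep lines otherwise (bOuter).
-- Both ports are proved equal to it.
def bInner : List String → Int → List String
  | [], _ => []
  | line :: rest, depth =>
    let d := depth + (PySem.Str.count line "{" : Int) - (PySem.Str.count line "}" : Int)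
    if d ≤ 0 ∧ (PySem.Str.isIn "{" line = true ∨ PySem.Str.isIn "}" line = true) then rest
    else bInner rest d

theorem bInner_length_le (ls : List String) (d : Int) : (bInner ls d).length ≤ ls.length := by
  induction ls generalizing d with
  | nil => simp [bInner]
  | cons line rest ih =>
    simp only [bInner]
    split
    · simp
    · exact Nat.le_succ_of_le (ih _)

def bOuter : List String → List String
  | [] => []
  | line :: rest =>
    if PySem.Str.startswith line "fn redis_" then
      bOuter (bInner (line :: rest) 0)
    else
      line :: bOuter rest
  termination_by ls => ls.length
  decreasing_by
    · simp only [bInner]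
      split
      · simp
      · exact Nat.lt_succ_of_le (bInner_length_le _ _)
    · simp

-- ---- A = bOuter (flag pass equals block-skip recursion) ----

theorem aLoop_depth_irrel (ls : List String) (res : List String) (d d' : Int) :
    aLoop ls res d false = aLoop ls res d' false := by
  induction ls generalizing res d d' with
  | nil => rfl
  | cons line rest ih =>
    simp only [aLoop, Bool.not_false, Bool.true_and]
    split_ifs <;> first | rfl | exact ih _ _ _ | tauto

theorem aLoop_skip (ls : List String) (res : List String) (d : Int) :
    aLoop ls res d true = aLoop (bInner ls d) res 0 false := by
  induction ls generalizing d with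
  | nil => rfl
  | cons line rest ih =>
    simp only [aLoop, bInner, Bool.not_true, Bool.false_and, Bool.false_eq_true, if_false]
    split_ifs <;> first | exact aLoop_depth_irrel _ _ _ _ | exact ih _ | tauto

theorem aLoop_eq_bOuter (n : Nat) (ls : List String) (hn : ls.length ≤ n) (res : List String) :
    aLoop ls res 0 false = res ++ bOuter ls := by
  induction n generalizing ls res with
  | zero =>
    have : ls = [] := List.eq_nil_of_length_eq_zero (Nat.le_zero.mp hn)
    subst this; simp [aLoop, bOuter]
  | succ n ih =>
    cases ls with
    | nil => simp [aLoop, bOuter]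
    | cons line rest =>
      rw [bOuter]
      simp only [aLoop, Bool.not_false, Bool.true_and]
      by_cases h : PySem.Str.startswith line "fn redis_" = true
      · simp only [h, if_true]
        rw [bInner]
        split_ifs with h1 h2 h3
        · rw [aLoop_depth_irrel _ _ _ 0]
          exact ih rest (Nat.le_of_succ_le_succ hn) res
        · tauto
        · tauto
        · rw [aLoop_skip]
          exact ih _ (le_trans (bInner_length_le _ _) (Nat.le_of_succ_le_succ hn)) res
      · simp only [h, if_false, Bool.false_eq_true]
        rw [ih rest (Nat.le_of_succ_le_succ hn) (res ++ [line])]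
        simp

-- ---- facts about the prefix-sum list ----

theorem pvPrefs_getD_zero (p : Int) (ls : List String) : (pvPrefs p ls).getD 0 0 = p := by
  cases ls <;> simp [pvPrefs]

theorem pvPrefs_getD_succ (p : Int) (ls : List String) (t : Nat) (h : t < ls.length) :
    (pvPrefs p ls).getD (t + 1) 0 = (pvPrefs p ls).getD t 0 + pvDelta (ls[t]'h) := by
  induction ls generalizing p t with
  | nil => simp at h
  | cons a rest ih =>
    cases t with
    | zero =>
      rw [pvPrefs, List.getD_cons_succ, List.getD_cons_zero, pvPrefs_getD_zero]
      simp
    | succ t =>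
      simp only [pvPrefs, List.getD_cons_succ]
      exact ih _ t (by simpa using Nat.lt_of_succ_lt_succ h)

theorem brace_getD (lines : List String) (t : Nat) (h : t < lines.length) :
    (lines.map pvBrace).getD t false = pvBrace (lines[t]'h) := by
  rw [List.getD_eq_getElem _ _ (by simpa using h)]; simp

-- ---- bInner on a suffix equals dropping to the found block end ----

theorem bInner_eq_findEnd (lines : List String) (i : Nat) :
    ∀ (m t : Nat), lines.length - t ≤ m → t ≤ lines.length →
    bInner (lines.drop t) ((pvPrefs 0 lines).getD t 0 - (pvPrefs 0 lines).getD i 0) =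
      lines.drop
        ((((List.range' t (lines.length - t)).find?
            (fun j => decide ((pvPrefs 0 lines).getD (j + 1) 0 - (pvPrefs 0 lines).getD i 0 ≤ 0) &&
              (lines.map pvBrace).getD j false)).getD lines.length) + 1) := by
  intro m
  induction m with
  | zero =>
    intro t hm ht
    have ht' : t = lines.length := by omega
    subst ht'
    simp [bInner, List.drop_of_length_le]
  | succ m ih =>
    intro t hm ht
    by_cases hlt : t < lines.length
    · rw [List.drop_eq_getElem_cons hlt]
      have hr : lines.length - t = (lines.length - (t + 1)) + 1 := by omega
      rw [hr, List.range'_succ]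
      rw [List.find?_cons]
      have hd := pvPrefs_getD_succ 0 lines t hlt
      have hb := brace_getD lines t hlt
      by_cases hc : ((pvPrefs 0 lines).getD (t + 1) 0 - (pvPrefs 0 lines).getD i 0 ≤ 0)
          ∧ pvBrace (lines[t]'hlt) = true
      · have : (decide ((pvPrefs 0 lines).getD (t + 1) 0 - (pvPrefs 0 lines).getD i 0 ≤ 0) &&
            (lines.map pvBrace).getD t false) = true := by
          rw [hb, hc.2, Bool.and_true]; exact decide_eq_true hc.1
        rw [this]
        simp only [bInner]
        rw [if_pos]
        · simp
        · constructor
          · have h1 := hc.1; rw [hd] at h1; unfold pvDelta at h1; omega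
          · have h2 := hc.2; unfold pvBrace at h2
            rcases Bool.or_eq_true_iff.mp h2 with h3 | h3
            · exact Or.inl h3
            · exact Or.inr h3
      · have : (decide ((pvPrefs 0 lines).getD (t + 1) 0 - (pvPrefs 0 lines).getD i 0 ≤ 0) &&
            (lines.map pvBrace).getD t false) = false := by
          rw [hb]
          rcases not_and_or.mp hc with h1 | h1
          · rw [decide_eq_false h1, Bool.false_and]
          · rw [Bool.eq_false_iff.mpr h1, Bool.and_false]
        rw [this]
        simp only [bInner]
        rw [if_neg]
        · have harg : (pvPrefs 0 lines).getD t 0 - (pvPrefs 0 lines).getD i 0 +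
              (PySem.Str.count (lines[t]'hlt) "{" : Int) - (PySem.Str.count (lines[t]'hlt) "}" : Int) =
              (pvPrefs 0 lines).getD (t + 1) 0 - (pvPrefs 0 lines).getD i 0 := by
            rw [hd]; unfold pvDelta; ring
          rw [harg]
          exact ih (t + 1) (by omega) (by omega)
        · intro hcontra
          apply hc
          constructor
          · rw [hd]; unfold pvDelta
            have := hcontra.1; omega
          · unfold pvBrace
            rcases hcontra.2 with h2 | h2
            · rw [h2, Bool.true_or]
            · rw [h2, Bool.or_true]
    · have ht' : t = lines.length := by omega
      subst ht'
      simp [bInner, List.drop_of_length_le]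

theorem bInner_drop_eq (lines : List String) (i : Nat) (h : i < lines.length) :
    bInner (lines.drop i) 0 =
      lines.drop (pvFindEnd (pvPrefs 0 lines) (lines.map pvBrace) lines.length i + 1) := by
  have := bInner_eq_findEnd lines i (lines.length - i) i (by omega) (by omega)
  simpa [pvFindEnd, sub_self] using this

-- ---- intervals collected from position i all start at or after i ----

theorem pvIntervals_ge (lines : List String) (pref : List Int) (brace : List Bool) (n : Nat) :
    ∀ (m i : Nat), n - i ≤ m → ∀ p ∈ pvIntervals lines pref brace n i, i ≤ p.1 := by
  intro m
  induction m with
  | zero =>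
    intro i hm p hp
    rw [pvIntervals] at hp
    rw [dif_neg (by omega)] at hp
    simp at hp
  | succ m ih =>
    intro i hm p hp
    rw [pvIntervals] at hp
    by_cases h : i < n
    · rw [dif_pos h] at hp
      by_cases hs : PySem.Str.startswith (lines.getD i "") "fn redis_" = true
      · rw [if_pos hs] at hp
        rcases List.mem_cons.mp hp with h1 | h1
        · subst h1; simp
        · have hge := pvFindEnd_ge pref brace n i h
          have := ih (pvFindEnd pref brace n i + 1) (by omega) p h1
          omega
      · rw [if_neg hs] at hp
        have := ih (i + 1) (by omega) p hp
        omega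
    · rw [dif_neg h] at hp
      simp at hp

-- ---- keeping the dropped-suffix invariant: bOuter (drop i) = filtered enumerate from i ----

theorem bOuter_eq_filter (lines : List String) :
    ∀ (m i : Nat), lines.length - i ≤ m →
    bOuter (lines.drop i) =
      ((PySem.List.enumerate (lines.drop i) (i : Int)).filter
        (fun kl => ! (pvIntervals lines (pvPrefs 0 lines) (lines.map pvBrace) lines.length i).any
          (fun se => decide ((se.1 : Int) ≤ kl.1 ∧ kl.1 ≤ (se.2 : Int))))).map Prod.snd := by
  intro m
  induction m with
  | zero =>
    intro i hm
    have h0 : lines.length ≤ i := by omega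
    rw [List.drop_of_length_le h0]
    rw [pvIntervals, dif_neg (by omega)]
    rw [show bOuter [] = [] from by rw [bOuter]]
    simp [PySem.List.enumerate_nil]
  | succ m ih =>
    intro i hm
    by_cases h : i < lines.length
    · rw [List.drop_eq_getElem_cons h, PySem.List.enumerate_cons, bOuter]
      rw [pvIntervals, dif_pos h]
      have hgetD : lines.getD i "" = lines[i]'h := List.getD_eq_getElem _ _ h
      by_cases hs : PySem.Str.startswith (lines[i]'h) "fn redis_" = true
      · rw [if_pos hs, hgetD, if_pos hs]
        rw [← List.drop_eq_getElem_cons h, bInner_drop_eq lines i h]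
        set j := pvFindEnd (pvPrefs 0 lines) (lines.map pvBrace) lines.length i with hj
        have hij : i ≤ j := pvFindEnd_ge _ _ _ _ h
        rw [ih (j + 1) (by omega)]
        -- now: filter over enumerate (drop (j+1)) (j+1) with intervals (j+1)
        --    = filter over (i,lines[i]) :: enumerate (drop (i+1)) (i+1) with (i,j)::intervals (j+1)
        -- we show the right-hand side of the goal equals it by splitting the segment i..j
        rw [show ((i : Int), lines[i]'h) :: PySem.List.enumerate (lines.drop (i + 1)) ((i : Int) + 1)
              = PySem.List.enumerate (lines.drop i) (i : Int) by
            rw [List.drop_eq_getElem_cons h, PySem.List.enumerate_cons]]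
        by_cases hjn : j < lines.length
        · -- split drop i = take (j+1-i) ++ drop (j+1)
          have hdeq : lines.drop i =
              (lines.drop i).take (j + 1 - i) ++ lines.drop (j + 1) := by
            conv_lhs => rw [← List.take_append_drop (j + 1 - i) (lines.drop i)]
            rw [List.drop_drop]
            congr 2
            omega
          rw [hdeq, PySem.List.enumerate_append, List.filter_append]
          have hseglen : ((lines.drop i).take (j + 1 - i)).length = j + 1 - i := by
            rw [List.length_take, List.length_drop]
            omega
          have hfirst : ((PySem.List.enumerate ((lines.drop i).take (j + 1 - i)) (i : Int)).filter
              (fun kl => ! ((i, j) :: pvIntervals lines (pvPrefs 0 lines) (lines.map pvBrace)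
                  lines.length (j + 1)).any
                (fun se => decide ((se.1 : Int) ≤ kl.1 ∧ kl.1 ≤ (se.2 : Int))))) = [] := by
            rw [List.filter_eq_nil_iff]
            intro p hp
            obtain ⟨k, hk, hpk⟩ := (PySem.List.mem_enumerate_iff _ _ _).mp hp
            rw [hseglen] at hk
            subst hpk
            simp
            intro hcon
            exfalso
            omega
          rw [hfirst, List.nil_append]
          have hstart : (i : Int) + (((lines.drop i).take (j + 1 - i)).length : Int) =
              ((j + 1 : Nat) : Int) := by
            rw [hseglen]; push_cast; omega
          rw [hstart]
          congr 1
          apply List.filter_congr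
          intro p hp
          obtain ⟨k, hk, hpk⟩ := (PySem.List.mem_enumerate_iff _ _ _).mp hp
          subst hpk
          simp only [List.any_cons]
          have hfalse : decide ((i : Int) ≤ ((j + 1 : Nat) : Int) + (k : Int) ∧
              ((j + 1 : Nat) : Int) + (k : Int) ≤ (j : Int)) = false := by
            simp only [decide_eq_false_iff_not, not_and, not_le]
            intro _
            push_cast
            omega
          rw [hfalse, Bool.false_or]
        · -- j ≥ length: the interval swallows everything to EOF on both sides
          have hd1 : lines.drop (j + 1) = [] := List.drop_of_length_le (by omega)
          rw [hd1]
          rw [pvIntervals, dif_neg (by omega)]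
          simp only [PySem.List.enumerate_nil, List.filter_nil, List.map_nil]
          symm
          rw [List.map_eq_nil_iff, List.filter_eq_nil_iff]
          intro p hp
          obtain ⟨k, hk, hpk⟩ := (PySem.List.mem_enumerate_iff _ _ _).mp hp
          subst hpk
          rw [List.length_drop] at hk
          simp
          omega
      · rw [if_neg hs, hgetD, if_neg hs]
        have hany : ((pvIntervals lines (pvPrefs 0 lines) (lines.map pvBrace) lines.length
            (i + 1)).any (fun se => decide ((se.1 : Int) ≤ (i : Int) ∧ (i : Int) ≤ (se.2 : Int)))) = false := by
          rw [List.any_eq_false]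
          intro se hse
          have := pvIntervals_ge lines (pvPrefs 0 lines) (lines.map pvBrace) lines.length
            (lines.length - (i + 1)) (i + 1) (by omega) se hse
          simp only [decide_eq_true_eq, not_and, not_le]
          intro hle
          have : ((i : Nat) + 1 : Int) ≤ (se.1 : Int) := by exact_mod_cast this
          omega
        rw [List.filter_cons]
        rw [hany]
        rw [if_pos (by simp)]
        rw [List.map_cons]
        rw [show ((i : Int) + 1) = ((i + 1 : Nat) : Int) by push_cast; ring]
        rw [← ih (i + 1) (by omega)]
    · have h0 : lines.length ≤ i := by omega
      rw [List.drop_of_length_le h0]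
      rw [pvIntervals, dif_neg (by omega)]
      rw [show bOuter [] = [] from by rw [bOuter]]
      simp [PySem.List.enumerate_nil]

-- ===== VERDICT (by name: the statement is the Claim_ definition above) =====
theorem strip_redis_stubs_py_spec : Claim_equal_strip_redis_stubs_py := by
  intro source _
  unfold Spec_strip_redis_stubs_py strip_redis_stubs_py strip_redis_stubs_py_alt
  rw [aLoop_eq_bOuter (PySem.Str.splitlines source).length _ le_rfl, List.nil_append]
  have h := bOuter_eq_filter (PySem.Str.splitlines source) (PySem.Str.splitlines source).length 0
    (by omega)
  simp only [List.drop_zero, Nat.cast_zero] at h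
  rw [h]
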